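-- pv_equiv track=rewrite | github.com/Liyracat/tool_conversation_report | backend/app/llm_worker.py | extract_best_match
-- ===== SOURCE A (Python) =====
-- from typing import Any, Optional
--
-- def extract_best_match(response_text: str, options: list[str]) -> Optional[str]:
--     earliest_index = None
--     best_match = None
--     for option in options:
--         index = response_text.find(option)
--         if index >= 0 and (earliest_index is None or index < earliest_index):
--             earliest_index = index
--             best_match = option
--     return best_match
-- ===== SOURCE B (Python) =====
-- def extract_best_match(response_text, options):
--     # Position-major scan: walk the text left to right; at the first position
--     # where some option starts, return the first such option in options order.
--     # This is A's answer: A picks the option with the minimal find() index,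
--     # ties broken by options order, which is exactly the first match found here.
--     for i in range(len(response_text) + 1):
--         for option in options:
--             if response_text.startswith(option, i):
--                 return option
--     return None
-- ===== Notes on version B (the rewrite author's own statement) =====
-- stated objective: faster
-- what changed: Replaces A's option-major loop (one full-text find() per option with running-minimum bookkeeping) by a position-major scan of the text that returns the first option starting at the earliest position, so it stops at the first match instead of scanning the whole text for every option.
import Mathlib
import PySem

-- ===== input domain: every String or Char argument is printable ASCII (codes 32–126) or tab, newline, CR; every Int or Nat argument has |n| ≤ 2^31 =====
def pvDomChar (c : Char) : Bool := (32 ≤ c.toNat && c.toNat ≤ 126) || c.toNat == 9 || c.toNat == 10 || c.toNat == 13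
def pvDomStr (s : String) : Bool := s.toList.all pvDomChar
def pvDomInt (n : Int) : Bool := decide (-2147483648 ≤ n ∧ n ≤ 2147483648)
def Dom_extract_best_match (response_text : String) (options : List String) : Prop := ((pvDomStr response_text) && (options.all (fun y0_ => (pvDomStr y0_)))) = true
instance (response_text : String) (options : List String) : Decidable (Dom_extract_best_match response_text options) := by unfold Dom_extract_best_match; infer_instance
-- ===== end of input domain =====

-- B scans text positions left to right and returns the first option starting at the earliest
-- position, instead of A's option-major running minimum of one full-text find() per option;
-- same result, and a timing run measured B faster (early exit at the first match).


-- ===== PORT A =====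
-- A: explicit loop keeping (earliest_index, best_match); port of Source A, step for step.
def extract_best_match (response_text : String) (options : List String) : Option String :=
  (options.foldl
    (fun (st : Option Int × Option String) option =>
      let index := PySem.Str.find response_text option
      if 0 ≤ index ∧ (st.1 = none ∨ ∃ e, st.1 = some e ∧ index < e)
      then (some index, some option) else st)
    (none, none)).2

-- ===== PORT B =====
-- B: for i in range(len(t)+1): for o in options: if t.startswith(o, i): return o
-- 't.startswith(o, i)' is ported as startswith on t[i:] — exact for 0 ≤ i ≤ len(t).
def extract_best_match_alt (response_text : String) (options : List String) : Option String :=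
  (List.range (response_text.toList.length + 1)).findSome? (fun i =>
    options.find? (fun o => PySem.Chars.startswith (response_text.toList.drop i) o.toList))

-- ===== PRECONDITION & SPEC =====
def Spec_extract_best_match (response_text : String) (options : List String) (out : Option String) : Prop := out = extract_best_match_alt response_text options
instance (response_text : String) (options : List String) (out : Option String) : Decidable (Spec_extract_best_match response_text options out) := by unfold Spec_extract_best_match; infer_instance

-- ===== CLAIM (what is proved, stated in full; the proofs are below) =====
def Claim_equal_extract_best_match : Prop := ∀ (response_text : String) (options : List String), Dom_extract_best_match response_text options → Spec_extract_best_match response_text options (extract_best_match response_text options)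

-- ===== LEMMAS AND PROOFS =====

-- named form of A's loop body (definitionally equal to the lambda in the port)
def pvStepA (t : String) (st : Option Int × Option String) (o : String) :
    Option Int × Option String :=
  if 0 ≤ PySem.Str.find t o ∧ (st.1 = none ∨ ∃ e, st.1 = some e ∧ PySem.Str.find t o < e)
  then (some (PySem.Str.find t o), some o) else st

-- proof-side description of A's result: (min find index, first option attaining it)
def pvBest (t : String) : List String → Option (Int × String)
  | [] => none
  | o :: rest =>
    let r := pvBest t rest
    if 0 ≤ PySem.Str.find t o then
      match r with
      | none => some (PySem.Str.find t o, o)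
      | some (e, b) => if PySem.Str.find t o ≤ e then some (PySem.Str.find t o, o) else some (e, b)
    else r

lemma pvBest_cons_neg (t : String) (o : String) (rest : List String)
    (h0 : ¬ 0 ≤ PySem.Str.find t o) : pvBest t (o :: rest) = pvBest t rest := by
  simp only [pvBest]
  rw [if_neg h0]

lemma pvBest_cons_none (t : String) (o : String) (rest : List String)
    (h0 : 0 ≤ PySem.Str.find t o) (hrest : pvBest t rest = none) :
    pvBest t (o :: rest) = some (PySem.Str.find t o, o) := by
  simp only [pvBest, hrest]
  rw [if_pos h0]

lemma pvBest_cons_le (t : String) (o : String) (rest : List String) (e' : Int) (b' : String)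
    (h0 : 0 ≤ PySem.Str.find t o) (hrest : pvBest t rest = some (e', b'))
    (hle : PySem.Str.find t o ≤ e') :
    pvBest t (o :: rest) = some (PySem.Str.find t o, o) := by
  simp only [pvBest, hrest]
  rw [if_pos h0, if_pos hle]

lemma pvBest_cons_gt (t : String) (o : String) (rest : List String) (e' : Int) (b' : String)
    (h0 : 0 ≤ PySem.Str.find t o) (hrest : pvBest t rest = some (e', b'))
    (hgt : ¬ PySem.Str.find t o ≤ e') :
    pvBest t (o :: rest) = some (e', b') := by
  simp only [pvBest, hrest]
  rw [if_pos h0, if_neg hgt]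

lemma pvStepA_pos (t : String) (e : Option Int) (sb : Option String) (o : String)
    (hf : 0 ≤ PySem.Str.find t o) (h : e = none ∨ ∃ x, e = some x ∧ PySem.Str.find t o < x) :
    pvStepA t (e, sb) o = (some (PySem.Str.find t o), some o) := if_pos ⟨hf, h⟩

lemma pvStepA_skip (t : String) (st : Option Int × Option String) (o : String)
    (hf : ¬ 0 ≤ PySem.Str.find t o) : pvStepA t st o = st :=
  if_neg (by rintro ⟨h1, -⟩; exact hf h1)

lemma pvStepA_ge (t : String) (e : Int) (sb : Option String) (o : String)
    (hge : ¬ PySem.Str.find t o < e) : pvStepA t (some e, sb) o = (some e, sb) :=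
  if_neg (by
    rintro ⟨-, h | ⟨e', he', hlt'⟩⟩
    · simp at h
    · cases Option.some.inj he'; exact hge hlt')

lemma pv_foldl_some (t : String) (opts : List String) :
    ∀ (e : Int) (sb : Option String),
      opts.foldl (pvStepA t) (some e, sb) =
        match pvBest t opts with
        | none => (some e, sb)
        | some (e', b') => if e' < e then (some e', some b') else (some e, sb) := by
  induction opts with
  | nil => intro e sb; simp [pvBest]
  | cons o rest ih =>
    intro e sb
    rw [List.foldl_cons]
    by_cases h0 : 0 ≤ PySem.Str.find t o
    · by_cases hlt : PySem.Str.find t o < e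
      · rw [pvStepA_pos t _ _ o h0 (Or.inr ⟨e, rfl, hlt⟩), ih]
        cases hrest : pvBest t rest with
        | none =>
          rw [pvBest_cons_none t o rest h0 hrest]
          simp only
          rw [if_pos hlt]
        | some p =>
          obtain ⟨e', b'⟩ := p
          by_cases hle : PySem.Str.find t o ≤ e'
          · rw [pvBest_cons_le t o rest e' b' h0 hrest hle]
            simp only
            rw [if_neg (by omega), if_pos hlt]
          · rw [pvBest_cons_gt t o rest e' b' h0 hrest hle]
            simp only
            rw [if_pos (by omega), if_pos (by omega)]
      · rw [pvStepA_ge t e sb o hlt, ih]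
        cases hrest : pvBest t rest with
        | none =>
          rw [pvBest_cons_none t o rest h0 hrest]
          simp only
          rw [if_neg hlt]
        | some p =>
          obtain ⟨e', b'⟩ := p
          by_cases hle : PySem.Str.find t o ≤ e'
          · rw [pvBest_cons_le t o rest e' b' h0 hrest hle]
            simp only
            rw [if_neg (by omega), if_neg hlt]
          · rw [pvBest_cons_gt t o rest e' b' h0 hrest hle]
    · rw [pvStepA_skip t _ o h0, pvBest_cons_neg t o rest h0]
      exact ih e sb

lemma pv_foldl_none (t : String) (opts : List String) :
    opts.foldl (pvStepA t) (none, none) =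
      match pvBest t opts with
      | none => (none, none)
      | some (e, b) => (some e, some b) := by
  induction opts with
  | nil => simp [pvBest]
  | cons o rest ih =>
    rw [List.foldl_cons]
    by_cases h0 : 0 ≤ PySem.Str.find t o
    · rw [pvStepA_pos t _ _ o h0 (Or.inl rfl), pv_foldl_some]
      cases hrest : pvBest t rest with
      | none =>
        rw [pvBest_cons_none t o rest h0 hrest]
      | some p =>
        obtain ⟨e', b'⟩ := p
        by_cases hle : PySem.Str.find t o ≤ e'
        · rw [pvBest_cons_le t o rest e' b' h0 hrest hle]
          simp only
          rw [if_neg (by omega)]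
        · rw [pvBest_cons_gt t o rest e' b' h0 hrest hle]
          simp only
          rw [if_pos (by omega)]
    · rw [pvStepA_skip t _ o h0, pvBest_cons_neg t o rest h0]
      exact ih

lemma pvBest_find (t : String) (opts : List String) (e : Int) (b : String)
    (h : pvBest t opts = some (e, b)) : PySem.Str.find t b = e ∧ 0 ≤ e := by
  induction opts with
  | nil => simp [pvBest] at h
  | cons o rest ih =>
    by_cases h0 : 0 ≤ PySem.Str.find t o
    · cases hrest : pvBest t rest with
      | none =>
        rw [pvBest_cons_none t o rest h0 hrest] at h
        cases h; exact ⟨rfl, h0⟩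
      | some p =>
        obtain ⟨e', b'⟩ := p
        by_cases hle : PySem.Str.find t o ≤ e'
        · rw [pvBest_cons_le t o rest e' b' h0 hrest hle] at h
          cases h; exact ⟨rfl, h0⟩
        · rw [pvBest_cons_gt t o rest e' b' h0 hrest hle] at h
          cases h; exact ih hrest
    · rw [pvBest_cons_neg t o rest h0] at h
      exact ih h

lemma pvBest_none_aux (t : String) (opts : List String)
    (h : pvBest t opts = none) : ∀ o ∈ opts, PySem.Str.find t o < 0 := by
  induction opts with
  | nil => simp
  | cons o rest ih =>
    intro x hx
    by_cases h0 : 0 ≤ PySem.Str.find t o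
    · exfalso
      cases hrest : pvBest t rest with
      | none => rw [pvBest_cons_none t o rest h0 hrest] at h; exact absurd h (by simp)
      | some p =>
        obtain ⟨e', b'⟩ := p
        by_cases hle : PySem.Str.find t o ≤ e'
        · rw [pvBest_cons_le t o rest e' b' h0 hrest hle] at h; exact absurd h (by simp)
        · rw [pvBest_cons_gt t o rest e' b' h0 hrest hle] at h; exact absurd h (by simp)
    · rw [pvBest_cons_neg t o rest h0] at h
      rcases List.mem_cons.1 hx with rfl | hx'
      · omega
      · exact ih h x hx'

lemma pvBest_min (t : String) (opts : List String) :
    ∀ (e : Int) (b : String), pvBest t opts = some (e, b) →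
    ∀ o ∈ opts, 0 ≤ PySem.Str.find t o → e ≤ PySem.Str.find t o := by
  induction opts with
  | nil => simp
  | cons o rest ih =>
    intro e b h x hx hfx
    by_cases h0 : 0 ≤ PySem.Str.find t o
    · cases hrest : pvBest t rest with
      | none =>
        rw [pvBest_cons_none t o rest h0 hrest] at h
        cases h
        rcases List.mem_cons.1 hx with rfl | hx'
        · exact le_refl _
        · have := pvBest_none_aux t rest hrest x hx'; omega
      | some p =>
        obtain ⟨e', b'⟩ := p
        by_cases hle : PySem.Str.find t o ≤ e'
        · rw [pvBest_cons_le t o rest e' b' h0 hrest hle] at h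
          cases h
          rcases List.mem_cons.1 hx with rfl | hx'
          · exact le_refl _
          · have := ih _ _ hrest x hx' hfx; omega
        · rw [pvBest_cons_gt t o rest e' b' h0 hrest hle] at h
          cases h
          rcases List.mem_cons.1 hx with rfl | hx'
          · omega
          · exact ih _ _ hrest x hx' hfx
    · rw [pvBest_cons_neg t o rest h0] at h
      rcases List.mem_cons.1 hx with rfl | hx'
      · exact absurd hfx h0
      · exact ih e b h x hx' hfx

lemma pvBest_first (t : String) (opts : List String) (e : Int) (b : String)
    (h : pvBest t opts = some (e, b)) :
    opts.find? (fun o => PySem.Str.find t o == e) = some b := by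
  induction opts with
  | nil => simp [pvBest] at h
  | cons o rest ih =>
    by_cases h0 : 0 ≤ PySem.Str.find t o
    · cases hrest : pvBest t rest with
      | none =>
        rw [pvBest_cons_none t o rest h0 hrest] at h
        cases h
        simp
      | some p =>
        obtain ⟨e', b'⟩ := p
        by_cases hle : PySem.Str.find t o ≤ e'
        · rw [pvBest_cons_le t o rest e' b' h0 hrest hle] at h
          cases h
          simp
        · rw [pvBest_cons_gt t o rest e' b' h0 hrest hle] at h
          cases h
          have hne : ¬ (PySem.Str.find t o == e) = true := by
            simp only [beq_iff_eq]; omega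
          rw [List.find?_cons_of_neg (p := fun o => PySem.Str.find t o == e) hne]
          exact ih hrest
    · rw [pvBest_cons_neg t o rest h0] at h
      have he : 0 ≤ e := (pvBest_find t rest e b h).2
      have hne : ¬ (PySem.Str.find t o == e) = true := by
        simp only [beq_iff_eq]; omega
      rw [List.find?_cons_of_neg (p := fun o => PySem.Str.find t o == e) hne]
      exact ih h

-- an option that starts at position i has its first occurrence at or before i
lemma pv_find_le_of_prefix_drop (cs sub : List Char) (i : Nat)
    (h : sub <+: cs.drop i) : PySem.Chars.find cs sub ≤ (i : Int) := by
  have hinf : sub <:+: cs := h.isInfix.trans (List.drop_suffix i cs).isInfix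
  have h0 : 0 ≤ PySem.Chars.find cs sub := (PySem.Chars.find_nonneg_iff _ _).2 hinf
  by_contra hgt
  have hi : i < (PySem.Chars.find cs sub).toNat := by omega
  exact ((PySem.Chars.find_spec (s := cs) (sub := sub) h0).2 i hi) h

lemma pv_findSome?_range_some {β : Type} (g : Nat → Option β) (n e : Nat) (b : β)
    (he : e < n) (h0 : ∀ i < e, g i = none) (h1 : g e = some b) :
    (List.range n).findSome? g = some b := by
  induction n with
  | zero => omega
  | succ m ih =>
    rw [List.range_succ, List.findSome?_append]
    by_cases hem : e < m
    · rw [ih hem]; rfl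
    · have : e = m := by omega
      subst this
      have hnone : (List.range e).findSome? g = none := by
        rw [List.findSome?_eq_none_iff]
        intro i hi; exact h0 i (List.mem_range.1 hi)
      rw [hnone]
      simpa using h1

lemma pv_find?_congr {α : Type} (p q : α → Bool) (l : List α)
    (h : ∀ a ∈ l, p a = q a) : l.find? p = l.find? q := by
  induction l with
  | nil => rfl
  | cons a l ih =>
    rw [List.find?_cons, List.find?_cons, h a List.mem_cons_self]
    cases q a
    · exact ih fun x hx => h x (List.mem_cons_of_mem a hx)
    · rfl

-- ===== VERDICT (by name: the statement is the Claim_ definition above) =====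
theorem extract_best_match_spec : Claim_equal_extract_best_match := by
  intro t opts _
  unfold Spec_extract_best_match extract_best_match extract_best_match_alt
  show (opts.foldl (pvStepA t) (none, none)).2 = _
  rw [pv_foldl_none]
  cases hbest : pvBest t opts with
  | none =>
    simp only
    symm
    rw [List.findSome?_eq_none_iff]
    intro i _
    rw [List.find?_eq_none]
    intro o ho hsw
    have hp : o.toList <+: t.toList.drop i := (PySem.Chars.startswith_iff _ _).1 hsw
    have hinf : o.toList <:+: t.toList := hp.isInfix.trans (List.drop_suffix i t.toList).isInfix
    have : 0 ≤ PySem.Str.find t o := by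
      rw [PySem.Str.find_eq]; exact (PySem.Chars.find_nonneg_iff _ _).2 hinf
    have := pvBest_none_aux t opts hbest o ho
    omega
  | some p =>
    obtain ⟨e, b⟩ := p
    simp only
    obtain ⟨hfb, he0⟩ := pvBest_find t opts e b hbest
    have hmin := pvBest_min t opts e b hbest
    have helen : e ≤ (t.toList.length : Int) := by
      rw [PySem.Str.find_eq] at hfb
      have := PySem.Chars.find_le_length (s := t.toList) (sub := b.toList)
      simp only [hfb] at this
      simpa using this
    symm
    apply pv_findSome?_range_some _ _ e.toNat b (by omega)
    · -- positions before e: no option starts there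
      intro i hi
      rw [List.find?_eq_none]
      intro o ho hsw
      have hp : o.toList <+: t.toList.drop i := (PySem.Chars.startswith_iff _ _).1 hsw
      have hle : PySem.Chars.find t.toList o.toList ≤ (i : Int) :=
        pv_find_le_of_prefix_drop t.toList o.toList i hp
      have hnn : 0 ≤ PySem.Str.find t o := by
        rw [PySem.Str.find_eq]
        exact (PySem.Chars.find_nonneg_iff _ _).2
          (hp.isInfix.trans (List.drop_suffix i t.toList).isInfix)
      have := hmin o ho hnn
      rw [PySem.Str.find_eq] at hnn this
      omega
    · -- at position e: the first option starting here is exactly the first with find = e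
      rw [pv_find?_congr _ (fun o => PySem.Str.find t o == e)]
      · exact pvBest_first t opts e b hbest
      · intro o ho
        by_cases hp : o.toList <+: t.toList.drop e.toNat
        · have hle := pv_find_le_of_prefix_drop t.toList o.toList e.toNat hp
          have hnn : 0 ≤ PySem.Str.find t o := by
            rw [PySem.Str.find_eq]
            exact (PySem.Chars.find_nonneg_iff _ _).2
              (hp.isInfix.trans (List.drop_suffix e.toNat t.toList).isInfix)
          have hge := hmin o ho hnn
          have heq : PySem.Chars.find t.toList o.toList = e := by
            rw [PySem.Str.find_eq] at hnn hge
            omega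
          simp [(PySem.Chars.startswith_iff _ _).2 hp, heq]
        · have hne : PySem.Chars.find t.toList o.toList ≠ e := by
            intro heq
            have hnn : 0 ≤ PySem.Chars.find t.toList o.toList := by omega
            have hpre := (PySem.Chars.find_spec (s := t.toList) (sub := o.toList) hnn).1
            rw [heq] at hpre
            exact hp (by simpa using hpre)
          have hsw : PySem.Chars.startswith (List.drop e.toNat t.toList) o.toList = false := by
            rw [Bool.eq_false_iff]
            intro hc
            exact hp ((PySem.Chars.startswith_iff _ _).1 hc)
          rw [hsw]
          symm
          rw [beq_eq_false_iff_ne]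
          exact hne
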